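-- pv_equiv track=rewrite | github.com/gabriellaec/desoft-analise-exercicios | backup/user_221/ch153_2020_04_13_20_45_05_913871.py | agrupa_por_idade
-- ===== SOURCE A (Python) =====
-- def agrupa_por_idade(dicionario):
--     faixa_etaria = {}
--     crianca = []
--     faixa_etaria['crianca'] = crianca
--     adolescente = []
--     faixa_etaria['adolescente'] = adolescente
--     adulto = []
--     faixa_etaria['adulto'] = adulto
--     idoso = []
--     faixa_etaria['idoso'] = idoso
--     for nome,idade in dicionario.items():
--         if dicionario[nome] <= 11:
--             crianca.append(nome)
--             faixa_etaria['crianca'] = crianca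
--         if 12 <= dicionario[nome] <= 17:
--             adolescente.append(nome)
--             faixa_etaria['adolescente'] = adolescente
--         if 18 <= dicionario[nome] <= 59:
--             adulto.append(nome)
--             faixa_etaria['adulto'] = adulto
--         if 60 <= dicionario[nome]:
--             idoso.append(nome)
--             faixa_etaria['idoso'] = idoso
--     return faixa_etaria
-- ===== SOURCE B (Python) =====
-- def agrupa_por_idade(dicionario):
--     return {
--         'crianca': [nome for nome, idade in dicionario.items() if idade <= 11],
--         'adolescente': [nome for nome, idade in dicionario.items() if 12 <= idade <= 17],
--         'adulto': [nome for nome, idade in dicionario.items() if 18 <= idade <= 59],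
--         'idoso': [nome for nome, idade in dicionario.items() if 60 <= idade],
--     }
-- ===== Notes on version B (the rewrite author's own statement) =====
-- stated objective: idiomatic
-- what changed: Replaced the single stateful loop with four-way branch dispatch, aliased lists and redundant dict reassignments by a dict literal of four independent comprehensions, one scan of the items per age bracket.
import Mathlib
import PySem

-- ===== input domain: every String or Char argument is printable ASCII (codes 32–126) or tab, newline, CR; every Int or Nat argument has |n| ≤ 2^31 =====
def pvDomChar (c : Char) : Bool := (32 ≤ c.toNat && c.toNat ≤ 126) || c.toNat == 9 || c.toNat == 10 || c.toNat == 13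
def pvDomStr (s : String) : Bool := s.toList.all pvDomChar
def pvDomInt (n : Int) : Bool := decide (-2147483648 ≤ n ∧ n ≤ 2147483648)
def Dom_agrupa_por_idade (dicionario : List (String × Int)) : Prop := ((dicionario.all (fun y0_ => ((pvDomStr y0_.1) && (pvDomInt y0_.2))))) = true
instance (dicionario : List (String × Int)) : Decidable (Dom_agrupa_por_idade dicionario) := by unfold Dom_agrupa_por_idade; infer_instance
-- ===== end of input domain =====

-- B replaces A's single stateful loop (aliased lists + redundant dict reassignments) by a
-- dict of four independent comprehensions, one scan per bracket (objective: idiomatic).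

-- ===== PORT A =====
-- The dict argument: duplicate keys in the assoc list collapse as in Python (last value wins,
-- position of first occurrence kept) via PySem.Dict.ofList.
-- Loop body of A as a helper (state = the four lists plus the result dict faixa_etaria).
def agrupaStep (d : PySem.Dict String Int)
    (st : List String × List String × List String × List String × PySem.Dict String (List String))
    (p : String × Int) :
    List String × List String × List String × List String × PySem.Dict String (List String) :=
  let (crianca, adolescente, adulto, idoso, fe) := st
  -- dicionario[nome]: the key comes from .items(), so the lookup always succeeds;
  -- the none branch is unreachable (exact).
  let v : Int := match d.get? p.1 with | some x => x | none => 0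
  let (crianca, fe) :=
    if v ≤ 11 then (crianca ++ [p.1], fe.insert "crianca" (crianca ++ [p.1])) else (crianca, fe)
  let (adolescente, fe) :=
    if 12 ≤ v ∧ v ≤ 17 then (adolescente ++ [p.1], fe.insert "adolescente" (adolescente ++ [p.1])) else (adolescente, fe)
  let (adulto, fe) :=
    if 18 ≤ v ∧ v ≤ 59 then (adulto ++ [p.1], fe.insert "adulto" (adulto ++ [p.1])) else (adulto, fe)
  let (idoso, fe) :=
    if 60 ≤ v then (idoso ++ [p.1], fe.insert "idoso" (idoso ++ [p.1])) else (idoso, fe)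
  (crianca, adolescente, adulto, idoso, fe)

def agrupa_por_idade (dicionario : List (String × Int)) : List (String × List String) :=
  let d := PySem.Dict.ofList dicionario
  let fe0 : PySem.Dict String (List String) :=
    ((((PySem.Dict.empty).insert "crianca" []).insert "adolescente" []).insert "adulto" []).insert "idoso" []
  let final := d.items.foldl (agrupaStep d)
    (([] : List String), ([] : List String), ([] : List String), ([] : List String), fe0)
  final.2.2.2.2.items

-- ===== PORT B =====
def agrupa_por_idade_alt (dicionario : List (String × Int)) : List (String × List String) :=
  let it := (PySem.Dict.ofList dicionario).items
  [("crianca", (it.filter (fun p => decide (p.2 ≤ 11))).map (·.1)),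
   ("adolescente", (it.filter (fun p => decide (12 ≤ p.2 ∧ p.2 ≤ 17))).map (·.1)),
   ("adulto", (it.filter (fun p => decide (18 ≤ p.2 ∧ p.2 ≤ 59))).map (·.1)),
   ("idoso", (it.filter (fun p => decide (60 ≤ p.2))).map (·.1))]

-- ===== PRECONDITION & SPEC =====
def Spec_agrupa_por_idade (dicionario : List (String × Int)) (out : List (String × List String)) : Prop := out = agrupa_por_idade_alt dicionario
instance (dicionario : List (String × Int)) (out : List (String × List String)) : Decidable (Spec_agrupa_por_idade dicionario out) := by unfold Spec_agrupa_por_idade; infer_instance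

-- ===== CLAIM (what is proved, stated in full; the proofs are below) =====
def Claim_equal_agrupa_por_idade : Prop := ∀ (dicionario : List (String × Int)), Dom_agrupa_por_idade dicionario → Spec_agrupa_por_idade dicionario (agrupa_por_idade dicionario)

-- ===== LEMMAS AND PROOFS =====

-- the dict A maintains always holds exactly these four keys, with the current lists as values
def feOf (c a ad i : List String) : PySem.Dict String (List String) :=
  PySem.Dict.mk [("crianca", c), ("adolescente", a), ("adulto", ad), ("idoso", i)]

theorem insert_feOf_crianca (c a ad i c' : List String) :
    (feOf c a ad i).insert "crianca" c' = feOf c' a ad i := by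
  apply PySem.Dict.ext
  rw [PySem.Dict.items_insert_of_contains]
  · simp [feOf]
  · simp [feOf]

theorem insert_feOf_adolescente (c a ad i a' : List String) :
    (feOf c a ad i).insert "adolescente" a' = feOf c a' ad i := by
  apply PySem.Dict.ext
  rw [PySem.Dict.items_insert_of_contains]
  · simp [feOf]
  · simp [feOf]

theorem insert_feOf_adulto (c a ad i ad' : List String) :
    (feOf c a ad i).insert "adulto" ad' = feOf c a ad' i := by
  apply PySem.Dict.ext
  rw [PySem.Dict.items_insert_of_contains]
  · simp [feOf]
  · simp [feOf]

theorem insert_feOf_idoso (c a ad i i' : List String) :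
    (feOf c a ad i).insert "idoso" i' = feOf c a ad i' := by
  apply PySem.Dict.ext
  rw [PySem.Dict.items_insert_of_contains]
  · simp [feOf]
  · simp [feOf]

theorem agrupaStep_feOf (d : PySem.Dict String Int) (nome : String) (idade : Int)
    (hv : d.get? nome = some idade) (c a ad i : List String) :
    agrupaStep d (c, a, ad, i, feOf c a ad i) (nome, idade) =
      (if idade ≤ 11 then c ++ [nome] else c,
       if 12 ≤ idade ∧ idade ≤ 17 then a ++ [nome] else a,
       if 18 ≤ idade ∧ idade ≤ 59 then ad ++ [nome] else ad,
       if 60 ≤ idade then i ++ [nome] else i,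
       feOf (if idade ≤ 11 then c ++ [nome] else c)
            (if 12 ≤ idade ∧ idade ≤ 17 then a ++ [nome] else a)
            (if 18 ≤ idade ∧ idade ≤ 59 then ad ++ [nome] else ad)
            (if 60 ≤ idade then i ++ [nome] else i)) := by
  unfold agrupaStep
  simp only [hv]
  split_ifs <;>
    simp_all [insert_feOf_crianca, insert_feOf_adolescente, insert_feOf_adulto, insert_feOf_idoso]

theorem agrupa_loop (d : PySem.Dict String Int) : ∀ (l : List (String × Int)),
    (∀ p ∈ l, d.get? p.1 = some p.2) → ∀ (c a ad i : List String),
    l.foldl (agrupaStep d) (c, a, ad, i, feOf c a ad i)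
    = (c ++ (l.filter (fun p => decide (p.2 ≤ 11))).map (·.1),
       a ++ (l.filter (fun p => decide (12 ≤ p.2 ∧ p.2 ≤ 17))).map (·.1),
       ad ++ (l.filter (fun p => decide (18 ≤ p.2 ∧ p.2 ≤ 59))).map (·.1),
       i ++ (l.filter (fun p => decide (60 ≤ p.2))).map (·.1),
       feOf (c ++ (l.filter (fun p => decide (p.2 ≤ 11))).map (·.1))
            (a ++ (l.filter (fun p => decide (12 ≤ p.2 ∧ p.2 ≤ 17))).map (·.1))
            (ad ++ (l.filter (fun p => decide (18 ≤ p.2 ∧ p.2 ≤ 59))).map (·.1))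
            (i ++ (l.filter (fun p => decide (60 ≤ p.2))).map (·.1))) := by
  intro l
  induction l with
  | nil => intro _ c a ad i; simp
  | cons hd tl ih =>
    intro hl c a ad i
    obtain ⟨nome, idade⟩ := hd
    have hv : d.get? nome = some idade := hl (nome, idade) (List.mem_cons_self ..)
    have hl' : ∀ p ∈ tl, d.get? p.1 = some p.2 := fun p hp => hl p (List.mem_cons_of_mem _ hp)
    rw [List.foldl_cons, agrupaStep_feOf d nome idade hv, ih hl']
    by_cases h1 : idade ≤ 11 <;> by_cases h2 : 12 ≤ idade ∧ idade ≤ 17 <;>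
      by_cases h3 : 18 ≤ idade ∧ idade ≤ 59 <;> by_cases h4 : 60 ≤ idade <;>
      simp [h1, h2, h3, h4]

theorem agrupa_por_idade_spec : Claim_equal_agrupa_por_idade := by
  intro dicionario _
  unfold Spec_agrupa_por_idade agrupa_por_idade agrupa_por_idade_alt
  have hnd := PySem.Dict.nodup_keys_ofList (κ := String) (ν := Int) dicionario
  have hl : ∀ p ∈ (PySem.Dict.ofList dicionario).items,
      (PySem.Dict.ofList dicionario).get? p.1 = some p.2 := by
    intro p hp
    obtain ⟨k, v⟩ := p
    exact PySem.Dict.get?_of_mem_items _ hp hnd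
  have h0 : ((((PySem.Dict.empty).insert "crianca" ([] : List String)).insert "adolescente" []).insert "adulto" []).insert "idoso" []
      = feOf [] [] [] [] := by decide
  simp only [h0]
  rw [agrupa_loop _ _ hl]
  simp [feOf]
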